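-- pv_equiv track=rewrite | github.com/yashikakashyapp/a2-peace-card-game | peace-card-game.py | draw_three_cards
-- ===== SOURCE A (Python) =====
-- def draw_three_cards(player_hand):
--     cards_drawn = []
--
--     for i in range(0, 3):
--
--         # check if the player still has cards left
--         if len(player_hand) > 0:
--             cards_drawn.append(player_hand.pop(0))
--         else:
--             break
--
--     return cards_drawn
-- ===== SOURCE B (Python) =====
-- def draw_three_cards(player_hand):
--     n = min(3, len(player_hand))
--     cards_drawn = player_hand[:n]
--     del player_hand[:n]
--     return cards_drawn
-- ===== Notes on version B (the rewrite author's own statement) =====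
-- stated objective: simpler
-- what changed: Replaces the range(3) loop of per-element pop(0) calls (each shifting the whole list) with one bulk front-slice read and one slice deletion.
import Mathlib
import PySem

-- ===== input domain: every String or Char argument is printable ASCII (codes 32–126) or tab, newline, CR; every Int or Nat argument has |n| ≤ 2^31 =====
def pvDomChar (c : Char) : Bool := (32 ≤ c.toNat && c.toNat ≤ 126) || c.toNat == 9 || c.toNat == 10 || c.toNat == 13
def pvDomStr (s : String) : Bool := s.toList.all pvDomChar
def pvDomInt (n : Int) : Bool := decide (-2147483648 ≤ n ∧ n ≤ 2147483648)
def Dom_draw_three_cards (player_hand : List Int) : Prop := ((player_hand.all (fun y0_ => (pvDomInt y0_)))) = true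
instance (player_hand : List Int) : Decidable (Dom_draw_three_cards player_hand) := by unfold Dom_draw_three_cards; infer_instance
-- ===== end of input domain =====

-- B replaces A's pop(0) loop with one bulk slice read (and one slice deletion of the
-- caller's list in place, matching A's mutation); equivalence proved for the RETURN value.


-- ===== PORT A =====
-- loop over range(0,3): pop the front card while the hand is non-empty, else break
def drawLoopA : List Int → List Int → List Int → List Int
  | [], _hand, drawn => drawn
  | _i :: rest, hand, drawn =>
    if hand.length > 0 then
      match PySem.List.pop? hand 0 with
      | some (c, hand') => drawLoopA rest hand' (drawn ++ [c])
      | none => drawn      -- unreachable: pop(0) succeeds on a non-empty list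
    else drawn             -- break

def draw_three_cards (player_hand : List Int) : List Int :=
  drawLoopA (PySem.List.pyRange 0 3 1) player_hand []

-- ===== PORT B =====
def draw_three_cards_alt (player_hand : List Int) : List Int :=
  let n : Int := min 3 (player_hand.length : Int)
  PySem.List.slice player_hand (some 0) (some n)

-- ===== PRECONDITION & SPEC =====
def Spec_draw_three_cards (player_hand : List Int) (out : List Int) : Prop := out = draw_three_cards_alt player_hand
instance (player_hand : List Int) (out : List Int) : Decidable (Spec_draw_three_cards player_hand out) := by unfold Spec_draw_three_cards; infer_instance

-- ===== CLAIM (what is proved, stated in full; the proofs are below) =====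
def Claim_equal_draw_three_cards : Prop := ∀ (player_hand : List Int), Dom_draw_three_cards player_hand → Spec_draw_three_cards player_hand (draw_three_cards player_hand)

-- ===== LEMMAS AND PROOFS =====
theorem alt_eq_take (h : List Int) : draw_three_cards_alt h = h.take 3 := by
  unfold draw_three_cards_alt
  have : min 3 ((h.length : Int)) = ((min 3 h.length : Nat) : Int) := by push_cast; rfl
  simp only [this]
  rw [show (some (0:Int)) = some ((0:Nat):Int) from rfl, PySem.List.slice_natCast]
  simp

theorem a_eq_take (h : List Int) : draw_three_cards h = h.take 3 := by
  unfold draw_three_cards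
  match h with
  | [] => rfl
  | [a] => rfl
  | [a, b] => rfl
  | a :: b :: c :: rest =>
    show drawLoopA _ _ _ = _
    rw [show PySem.List.pyRange 0 3 1 = [0,1,2] from rfl]
    simp [drawLoopA, PySem.List.pop?_zero_cons]

-- ===== VERDICT (by name: the statement is the Claim_ definition above) =====
theorem draw_three_cards_spec : Claim_equal_draw_three_cards := by
  intro h _
  show _ = _
  rw [a_eq_take, alt_eq_take]
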